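-- pv_equiv track=rewrite | github.com/cry999/AtCoder | beginner-contest/095/C.py | half_and_half
-- ===== SOURCE A (Python) =====
-- def half_and_half(
--         A: int, B: int, C: int, X: int, Y: int) -> int:
--     """
--     :param A: A ピザの値段
--     :param B: B ピザの値段
--     :param C: AB ピザの値段
--     :param X: A ピザの必要数
--     :param Y: B ピザの必要数
--     """
--     min_price = float('inf')
--     for num_ab in range(max(X, Y)+1):
--         num_a, num_b = max(0, X-num_ab), max(0, Y-num_ab)
--         price = num_a*A + num_b*B + 2*num_ab*C
--         min_price = min(min_price, price)
--
--     return min_price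
-- ===== SOURCE B (Python) =====
-- # O(1): the cost as a function of the number of AB-pairs is piecewise linear
-- # with breakpoints at max(0, min(X, Y)) and max(0, X, Y); a linear piece is
-- # minimised at an endpoint, so only the three candidate counts matter.
-- def half_and_half(
--         A: int, B: int, C: int, X: int, Y: int) -> int:
--     def cost(t):
--         return max(0, X - t) * A + max(0, Y - t) * B + 2 * t * C
--     lo = max(0, min(X, Y))
--     hi = max(0, X, Y)
--     return min(cost(0), cost(lo), cost(hi))
-- ===== Notes on version B (the rewrite author's own statement) =====
-- stated objective: faster
-- what changed: Replaces the O(max(X,Y)) scan over every possible number of AB-pizza pairs by evaluating the piecewise-linear cost only at its three breakpoints 0, max(0,min(X,Y)) and max(0,X,Y), since each linear piece attains its minimum at an endpoint.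
-- outside the precondition, e.g. on half_and_half(1, 1, 1, -2, -1): A returns inf, B returns 0
import Mathlib
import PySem

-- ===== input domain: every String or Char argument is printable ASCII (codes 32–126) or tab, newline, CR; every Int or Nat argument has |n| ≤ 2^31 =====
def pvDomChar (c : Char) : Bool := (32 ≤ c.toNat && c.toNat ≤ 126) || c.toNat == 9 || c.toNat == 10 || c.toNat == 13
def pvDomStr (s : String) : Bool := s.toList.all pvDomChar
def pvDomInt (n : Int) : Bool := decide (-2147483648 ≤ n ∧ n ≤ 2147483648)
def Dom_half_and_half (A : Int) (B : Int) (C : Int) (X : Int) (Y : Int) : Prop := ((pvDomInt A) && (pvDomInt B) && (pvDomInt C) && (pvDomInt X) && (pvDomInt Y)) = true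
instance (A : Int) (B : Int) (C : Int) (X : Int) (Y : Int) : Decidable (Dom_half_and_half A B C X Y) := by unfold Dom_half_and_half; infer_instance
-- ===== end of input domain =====

-- B replaces A's scan over every candidate count by evaluating the piecewise-linear
-- cost only at its breakpoints (a different, O(1) algorithm); same return value
-- wherever A returns an int.

-- ===== PORT A =====
-- literal port: min_price starts as float('inf'), modelled by `none`; the final
-- `.getD 0` is never reached inside Pre_ (there the loop runs at least once).
def half_and_half_step (A : Int) (B : Int) (C : Int) (X : Int) (Y : Int)
    (min_price : Option Int) (num_ab : Int) : Option Int :=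
  let num_a := max 0 (X - num_ab)
  let num_b := max 0 (Y - num_ab)
  let price := num_a * A + num_b * B + 2 * num_ab * C
  match min_price with
  | none => some price
  | some m => some (min m price)

def half_and_half (A : Int) (B : Int) (C : Int) (X : Int) (Y : Int) : Int :=
  ((PySem.List.pyRange 0 (max X Y + 1) 1).foldl (half_and_half_step A B C X Y) none).getD 0

-- ===== PORT B =====
def hcost (A : Int) (B : Int) (C : Int) (X : Int) (Y : Int) (t : Int) : Int :=
  max 0 (X - t) * A + max 0 (Y - t) * B + 2 * t * C

def half_and_half_alt (A : Int) (B : Int) (C : Int) (X : Int) (Y : Int) : Int :=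
  let lo := max 0 (min X Y)
  let hi := max 0 (max X Y)
  min (min (hcost A B C X Y 0) (hcost A B C X Y lo)) (hcost A B C X Y hi)

-- ===== PRECONDITION & SPEC =====
-- Pre_ excludes exactly the inputs with X < 0 and Y < 0: there A's loop body never
-- runs and A returns float('inf'), which is not a value of the declared int type.
def Pre_half_and_half (A : Int) (B : Int) (C : Int) (X : Int) (Y : Int) : Prop :=
  0 ≤ max X Y
instance (A : Int) (B : Int) (C : Int) (X : Int) (Y : Int) : Decidable (Pre_half_and_half A B C X Y) := by unfold Pre_half_and_half; infer_instance
def pvWitness_half_and_half : Int × Int × Int × Int × Int := (700, 600, 400, 3, 2)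

def Spec_half_and_half (A : Int) (B : Int) (C : Int) (X : Int) (Y : Int) (out : Int) : Prop := out = half_and_half_alt A B C X Y
instance (A : Int) (B : Int) (C : Int) (X : Int) (Y : Int) (out : Int) : Decidable (Spec_half_and_half A B C X Y out) := by unfold Spec_half_and_half; infer_instance

-- ===== CLAIM (what is proved, stated in full; the proofs are below) =====
def Claim_equal_half_and_half : Prop := ∀ (A : Int) (B : Int) (C : Int) (X : Int) (Y : Int), Dom_half_and_half A B C X Y → Pre_half_and_half A B C X Y → Spec_half_and_half A B C X Y (half_and_half A B C X Y)

-- ===== LEMMAS AND PROOFS =====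

theorem step_none (A B C X Y n : Int) :
    half_and_half_step A B C X Y none n = some (hcost A B C X Y n) := rfl

theorem step_some (A B C X Y m n : Int) :
    half_and_half_step A B C X Y (some m) n = some (min m (hcost A B C X Y n)) := rfl

-- once the accumulator is `some a`, A's fold is a plain running minimum
theorem port_foldl (A B C X Y : Int) (l : List Int) (a : Int) :
    l.foldl (half_and_half_step A B C X Y) (some a)
      = some (l.foldl (fun m n => min m (hcost A B C X Y n)) a) := by
  induction l generalizing a with
  | nil => rfl
  | cons x xs ih => rw [List.foldl_cons, step_some, List.foldl_cons]; exact ih _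

theorem foldl_min_le (f : Int → Int) (l : List Int) (a : Int) :
    l.foldl (fun m n => min m (f n)) a ≤ a ∧
    ∀ t ∈ l, l.foldl (fun m n => min m (f n)) a ≤ f t := by
  induction l generalizing a with
  | nil => simp
  | cons x xs ih =>
    obtain ⟨h1, h2⟩ := ih (min a (f x))
    refine ⟨le_trans h1 (min_le_left _ _), ?_⟩
    intro t ht
    rcases List.mem_cons.mp ht with rfl | ht
    · exact le_trans h1 (min_le_right _ _)
    · exact h2 t ht

theorem foldl_min_attained (f : Int → Int) (l : List Int) (a : Int) :
    l.foldl (fun m n => min m (f n)) a = a ∨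
    ∃ t ∈ l, l.foldl (fun m n => min m (f n)) a = f t := by
  induction l generalizing a with
  | nil => simp
  | cons x xs ih =>
    rcases ih (min a (f x)) with h | ⟨t, ht, h⟩
    · rcases min_cases a (f x) with ⟨e, _⟩ | ⟨e, _⟩
      · exact Or.inl (by rw [List.foldl_cons, h, e])
      · exact Or.inr ⟨x, List.mem_cons_self, by rw [List.foldl_cons, h, e]⟩
    · exact Or.inr ⟨t, List.mem_cons_of_mem _ ht, by rw [List.foldl_cons]; exact h⟩

theorem alt_eq (A B C X Y : Int) :
    half_and_half_alt A B C X Y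
      = min (min (hcost A B C X Y 0) (hcost A B C X Y (max 0 (min X Y))))
            (hcost A B C X Y (max 0 (max X Y))) := rfl

-- closed forms of the cost on each linear piece
theorem hcost_eq (A B C X Y t : Int) (hx : t ≤ X) (hy : t ≤ Y) :
    hcost A B C X Y t = (X - t) * A + (Y - t) * B + 2 * t * C := by
  unfold hcost
  have h1 : max 0 (X - t) = X - t := by omega
  have h2 : max 0 (Y - t) = Y - t := by omega
  rw [h1, h2]

theorem hcost_eqX (A B C X Y t : Int) (hx : X ≤ t) (hy : t ≤ Y) :
    hcost A B C X Y t = (Y - t) * B + 2 * t * C := by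
  unfold hcost
  have h1 : max 0 (X - t) = 0 := by omega
  have h2 : max 0 (Y - t) = Y - t := by omega
  rw [h1, h2]; ring

theorem hcost_eqY (A B C X Y t : Int) (hx : t ≤ X) (hy : Y ≤ t) :
    hcost A B C X Y t = (X - t) * A + 2 * t * C := by
  unfold hcost
  have h1 : max 0 (X - t) = X - t := by omega
  have h2 : max 0 (Y - t) = 0 := by omega
  rw [h1, h2]; ring

-- the minimum of a linear function over an interval sits at an endpoint
theorem lin_min (s u v t fu fv ft : Int) (hu : u ≤ t) (hv : t ≤ v)
    (e1 : fu + (t - u) * s = ft) (e2 : fv + (t - v) * s = ft) :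
    min fu fv ≤ ft := by
  rcases le_total 0 s with hs | hs
  · exact le_trans (min_le_left _ _)
      (by nlinarith [mul_nonneg (sub_nonneg.2 hu) hs])
  · refine le_trans (min_le_right _ _) ?_
    nlinarith [mul_nonneg (by omega : (0:Int) ≤ v - t) (by omega : (0:Int) ≤ -s)]

-- B's value is a lower bound of the cost at every count A scans
theorem alt_le_cost (A B C X Y : Int) (hM : 0 ≤ max X Y) (t : Int)
    (h0 : 0 ≤ t) (hM' : t ≤ max X Y) :
    half_and_half_alt A B C X Y ≤ hcost A B C X Y t := by
  rw [alt_eq]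
  have hhi : max 0 (max X Y) = max X Y := by omega
  rw [hhi]
  rcases le_total t (max 0 (min X Y)) with hlo | hlo
  · -- first piece: 0 ≤ t ≤ max 0 (min X Y)
    refine le_trans (min_le_left _ _) ?_
    rcases le_total (min X Y) 0 with h | h
    · have ht : t = 0 := by omega
      rw [ht]; exact min_le_left _ _
    · have hL : max 0 (min X Y) = min X Y := by omega
      rw [hL] at hlo ⊢
      refine lin_min (2 * C - A - B) 0 (min X Y) t _ _ _ h0 hlo ?_ ?_
      · rw [hcost_eq A B C X Y 0 (by omega) (by omega),
            hcost_eq A B C X Y t (by omega) (by omega)]; ring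
      · rw [hcost_eq A B C X Y (min X Y) (by omega) (by omega),
            hcost_eq A B C X Y t (by omega) (by omega)]; ring
  · -- second piece: max 0 (min X Y) ≤ t ≤ max X Y
    refine le_trans (by omega :
      min (min (hcost A B C X Y 0) (hcost A B C X Y (max 0 (min X Y)))) (hcost A B C X Y (max X Y))
        ≤ min (hcost A B C X Y (max 0 (min X Y))) (hcost A B C X Y (max X Y))) ?_
    rcases le_total X Y with hxy | hxy
    · -- min = X, max = Y
      have hL : max 0 (min X Y) = max 0 X := by omega
      have hH : max X Y = Y := by omega
      rw [hL, hH] at *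
      refine lin_min (2 * C - B) (max 0 X) Y t _ _ _ (by omega) (by omega) ?_ ?_
      · rw [hcost_eqX A B C X Y (max 0 X) (by omega) (by omega),
            hcost_eqX A B C X Y t (by omega) (by omega)]; ring
      · rw [hcost_eqX A B C X Y Y (by omega) (by omega),
            hcost_eqX A B C X Y t (by omega) (by omega)]; ring
    · -- min = Y, max = X
      have hL : max 0 (min X Y) = max 0 Y := by omega
      have hH : max X Y = X := by omega
      rw [hL, hH] at *
      refine lin_min (2 * C - A) (max 0 Y) X t _ _ _ (by omega) (by omega) ?_ ?_
      · rw [hcost_eqY A B C X Y (max 0 Y) (by omega) (by omega),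
            hcost_eqY A B C X Y t (by omega) (by omega)]; ring
      · rw [hcost_eqY A B C X Y X (by omega) (by omega),
            hcost_eqY A B C X Y t (by omega) (by omega)]; ring

-- B's value is attained at one of the scanned counts
theorem alt_attained (A B C X Y : Int) (hM : 0 ≤ max X Y) :
    ∃ t, 0 ≤ t ∧ t ≤ max X Y ∧ half_and_half_alt A B C X Y = hcost A B C X Y t := by
  rw [alt_eq]
  rcases le_total (min (hcost A B C X Y 0) (hcost A B C X Y (max 0 (min X Y))))
      (hcost A B C X Y (max 0 (max X Y))) with h | h
  · rw [min_eq_left h]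
    rcases le_total (hcost A B C X Y 0) (hcost A B C X Y (max 0 (min X Y))) with h2 | h2
    · exact ⟨0, le_refl 0, hM, min_eq_left h2⟩
    · exact ⟨max 0 (min X Y), by omega, by omega, min_eq_right h2⟩
  · rw [min_eq_right h]
    exact ⟨max 0 (max X Y), by omega, by omega, by rw [show max 0 (max X Y) = max X Y by omega]⟩

-- ===== VERDICT (by name: the statement is the Claim_ definition above) =====
theorem half_and_half_spec : Claim_equal_half_and_half := by
  intro A B C X Y hDom hPre
  have h0 : (0:Int) ≤ max X Y := hPre
  unfold Spec_half_and_half half_and_half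
  rw [PySem.List.pyRange_one_cons (by omega : (0:Int) < max X Y + 1),
      List.foldl_cons, step_none, port_foldl]
  show ((PySem.List.pyRange 1 (max X Y + 1) 1).foldl
      (fun m n => min m (hcost A B C X Y n)) (hcost A B C X Y 0)) = _
  apply le_antisymm
  · obtain ⟨t0, ht0, htM, he⟩ := alt_attained A B C X Y h0
    rw [he]
    by_cases hz : t0 = 0
    · subst hz
      exact (foldl_min_le (hcost A B C X Y) _ _).1
    · exact (foldl_min_le (hcost A B C X Y) _ _).2 t0
        (PySem.List.mem_pyRange_one.mpr ⟨by omega, by omega⟩)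
  · rcases foldl_min_attained (hcost A B C X Y)
        (PySem.List.pyRange 1 (max X Y + 1) 1) (hcost A B C X Y 0) with h | ⟨t, ht, h⟩
    · rw [h]; exact alt_le_cost A B C X Y h0 0 le_rfl h0
    · rw [h]
      obtain ⟨h1, h2⟩ := PySem.List.mem_pyRange_one.mp ht
      exact alt_le_cost A B C X Y h0 t (by omega) (by omega)
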